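-- pv_equiv track=rewrite | github.com/sayranovv/psu-code-review-labs | lab1/Task01.py | find_decreasing_subsequences
-- ===== SOURCE A (Python) =====
-- def find_decreasing_subsequences(nums):
--     n = len(nums)
--     lengths = []
--     #Итерируемся по списку, чтобы найти убывающие последовательности
--     for i in range(n):
--         current_length = 1  # Начинаем с первого элемента
--         for j in range(i + 1, n):
--             if nums[j] < nums[j - 1]:  # Проверяем на убывание
--                 current_length += 1
--             else:
--                 break  # Останавливаемся, если последовательность больше не убывает
--         if current_length > 1:  # Учитываем только длины больше 1
--             lengths.append(current_length)
--     return lengths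
-- ===== SOURCE B (Python) =====
-- def find_decreasing_subsequences(nums):
--     # Right-to-left single pass: run[i] = run[i+1] + 1 if the step i -> i+1 decreases, else 1.
--     n = len(nums)
--     run = [1] * n
--     for i in range(n - 2, -1, -1):
--         if nums[i + 1] < nums[i]:
--             run[i] = run[i + 1] + 1
--     return [r for r in run if r > 1]
-- ===== Notes on version B (the rewrite author's own statement) =====
-- stated objective: faster
-- what changed: Replaces the nested scan that recounts each decreasing run from every index by a single right-to-left pass that extends the run length of the next index by one, then filters lengths > 1.
import Mathlib
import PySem

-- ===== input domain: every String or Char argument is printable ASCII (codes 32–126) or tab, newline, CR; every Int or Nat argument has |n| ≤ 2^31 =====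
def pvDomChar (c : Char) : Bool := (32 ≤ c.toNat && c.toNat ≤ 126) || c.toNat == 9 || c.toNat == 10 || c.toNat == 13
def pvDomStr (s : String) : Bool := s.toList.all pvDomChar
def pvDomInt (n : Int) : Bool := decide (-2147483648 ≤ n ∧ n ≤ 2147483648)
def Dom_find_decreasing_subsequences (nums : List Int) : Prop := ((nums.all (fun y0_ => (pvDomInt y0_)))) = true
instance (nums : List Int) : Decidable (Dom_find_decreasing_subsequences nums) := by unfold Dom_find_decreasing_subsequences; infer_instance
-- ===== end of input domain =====

-- B replaces A's per-index rescan of each decreasing run by a single right-to-left pass extending run lengths (objective: faster); return values proved equal.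

-- ===== PORT A =====
-- inner loop: for j in range(i+1, n): if nums[j] < nums[j-1]: current_length += 1 else: break
-- (both indices j and j-1 are always in range when read, so List.getD computes exactly what nums[j] does)
def aInner (nums : List Int) (n j : Nat) (cur : Int) : Int :=
  if _h : j < n then
    if nums.getD j 0 < nums.getD (j - 1) 0 then aInner nums n (j + 1) (cur + 1) else cur
  else cur
termination_by n - j

def find_decreasing_subsequences (nums : List Int) : List Int :=
  let n := nums.length
  (List.range n).foldl (fun lengths i =>
    let cur := aInner nums n (i + 1) 1
    if cur > 1 then lengths ++ [cur] else lengths) []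

-- ===== PORT B =====
-- run[i] = run[i+1] + 1 if nums[i+1] < nums[i] else 1, computed right to left
-- (Source B fills the array from the back; the structural recursion consumes the list the same way,
--  each entry built from the entry for the next index)
def runsB : List Int → List Int
  | [] => []
  | [_] => [1]
  | x :: y :: t =>
    let r := runsB (y :: t)
    (if y < x then r.headD 1 + 1 else 1) :: r

def find_decreasing_subsequences_alt (nums : List Int) : List Int :=
  (runsB nums).filter (fun r => r > 1)

-- ===== PRECONDITION & SPEC =====
def Spec_find_decreasing_subsequences (nums : List Int) (out : List Int) : Prop := out = find_decreasing_subsequences_alt nums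
instance (nums : List Int) (out : List Int) : Decidable (Spec_find_decreasing_subsequences nums out) := by unfold Spec_find_decreasing_subsequences; infer_instance

-- ===== CLAIM (what is proved, stated in full; the proofs are below) =====
def Claim_equal_find_decreasing_subsequences : Prop := ∀ (nums : List Int), Dom_find_decreasing_subsequences nums → Spec_find_decreasing_subsequences nums (find_decreasing_subsequences nums)

-- ===== LEMMAS AND PROOFS =====

-- number of consecutive decreasing steps starting at the head
def steps : List Int → Int
  | x :: y :: t => if y < x then steps (y :: t) + 1 else 0
  | _ => 0

-- A's inner loop starting at index j+1 adds to cur the decreasing steps from index j on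
lemma aInner_eq_steps (nums : List Int) (j : Nat) (cur : Int) :
    aInner nums nums.length (j + 1) cur = cur + steps (nums.drop j) := by
  have key : ∀ k j cur, nums.length - j ≤ k →
      aInner nums nums.length (j + 1) cur = cur + steps (nums.drop j) := by
    intro k
    induction k with
    | zero =>
      intro j cur h
      have hj : nums.length ≤ j := by omega
      have hnj : ¬ (j + 1 < nums.length) := by omega
      rw [aInner]
      rw [List.drop_eq_nil_of_le hj]
      simp [steps, hnj]
    | succ k ih =>
      intro j cur h
      rw [aInner]
      by_cases hj : j + 1 < nums.length
      · have hjl : j < nums.length := by omega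
        have e1 : nums.getD (j + 1) 0 = nums[j + 1] := List.getD_eq_getElem nums 0 hj
        have e2 : nums.getD (j + 1 - 1) 0 = nums[j] := List.getD_eq_getElem nums 0 hjl
        have d1 : nums.drop j = nums[j] :: nums.drop (j + 1) :=
          List.drop_eq_getElem_cons hjl
        have d2 : nums.drop (j + 1) = nums[j + 1] :: nums.drop (j + 2) :=
          List.drop_eq_getElem_cons hj
        rw [e1, e2, d1, d2]
        simp only [steps, ← d2]
        split_ifs with hlt
        · rw [ih (j + 1) (cur + 1) (by omega)]
          ring
        · simp
      · have hlen : (nums.drop j).length ≤ 1 := by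
          simp [List.length_drop]; omega
        have hs : steps (nums.drop j) = 0 := by
          rcases hd : nums.drop j with _ | ⟨a, _ | ⟨b, t⟩⟩
          · simp [steps]
          · simp [steps]
          · rw [hd] at hlen; simp at hlen
        simp [hj, hs]
  exact key (nums.length - j) j cur le_rfl

-- B's head entry is exactly the run length (steps + 1) from the head
lemma runsB_cons (x : Int) (t : List Int) :
    runsB (x :: t) = (steps (x :: t) + 1) :: runsB t := by
  induction t generalizing x with
  | nil => simp [runsB, steps]
  | cons y t ih =>
    rw [runsB]
    simp only [ih y, List.headD_cons, steps]
    split_ifs <;> simp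

lemma range_map_steps (l : List Int) :
    (List.range l.length).map (fun i => steps (l.drop i) + 1) = runsB l := by
  induction l with
  | nil => simp [runsB]
  | cons x t ih =>
    rw [runsB_cons, List.length_cons, List.range_succ_eq_map]
    simp only [List.map_cons, List.drop_zero, List.map_map, Function.comp_def,
      List.drop_succ_cons]
    exact congrArg _ ih

lemma ports_eq (nums : List Int) :
    find_decreasing_subsequences nums = find_decreasing_subsequences_alt nums := by
  unfold find_decreasing_subsequences find_decreasing_subsequences_alt
  have hf : ∀ i, aInner nums nums.length (i + 1) 1 = steps (nums.drop i) + 1 := by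
    intro i; rw [aInner_eq_steps]; ring
  simp only [hf]
  have hfun : (fun (lengths : List Int) (i : Nat) =>
      if steps (nums.drop i) + 1 > 1 then lengths ++ [steps (nums.drop i) + 1] else lengths)
      = (fun acc i => if (fun i => decide (steps (nums.drop i) + 1 > 1)) i = true
          then acc ++ [(fun i => steps (nums.drop i) + 1) i] else acc) := by
    funext acc i; simp
  rw [hfun, PySem.List.foldl_append_if, List.nil_append,
    show (fun i => decide (steps (nums.drop i) + 1 > 1))
      = ((fun r => decide (r > 1)) ∘ (fun i => steps (nums.drop i) + 1)) from rfl,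
    ← List.filter_map, range_map_steps]

-- ===== VERDICT (by name: the statement is the Claim_ definition above) =====
theorem find_decreasing_subsequences_spec : Claim_equal_find_decreasing_subsequences := by
  intro nums _
  exact ports_eq nums
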